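-- pv_equiv track=rewrite | github.com/DarrellOwensRCD/SantaCruzMetroTransitApp | Scraper.py | buscode
-- ===== SOURCE A (Python) =====
-- def buscode(string):
--     #This gets the bus bound code to generate the map
--     count = 0
--     new_str = ""
--     for i in range(0, len(string)):
--         if(count == 1 and string[i] != "-"):
--             #covert center values to zero so that Mapbox Recognizes it 74-11-55 -> 75-00-55
--             new_str = new_str + '0'
--         if(count == 3):
--             break
--         if(string[i] == "-"):
--             count = count + 1
--         else:
--             if(count != 1):
--                 new_str = new_str + string[i]
--     return new_str
-- ===== SOURCE B (Python) =====
-- def buscode(string):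
--     parts = string.split('-')
--     res = parts[0]
--     if len(parts) >= 2:
--         res += '0' * len(parts[1])
--     if len(parts) >= 3:
--         res += parts[2]
--     return res
-- ===== Notes on version B (the rewrite author's own statement) =====
-- stated objective: simpler
-- what changed: Replaces the char-by-char dash-counting state machine with a split-then-index pass: keep the first segment, zero-fill the middle segment to its exact length, append the third segment, and drop any later segments just as A's break does.
import Mathlib
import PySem

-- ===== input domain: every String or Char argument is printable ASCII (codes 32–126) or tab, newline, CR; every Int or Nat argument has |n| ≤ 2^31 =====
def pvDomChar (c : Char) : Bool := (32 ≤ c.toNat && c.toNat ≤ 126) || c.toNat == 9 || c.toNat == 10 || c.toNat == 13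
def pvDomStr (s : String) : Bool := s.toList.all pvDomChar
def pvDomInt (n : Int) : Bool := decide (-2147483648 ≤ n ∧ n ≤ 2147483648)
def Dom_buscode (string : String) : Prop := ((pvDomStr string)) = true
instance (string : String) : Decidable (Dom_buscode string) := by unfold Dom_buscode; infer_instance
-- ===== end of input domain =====

-- B replaces A's char-by-char dash-counting state machine with a split('-')-then-index pass (objective: simpler).

-- ===== PORT A =====
-- the for-loop with `count`/`new_str` state and the `break` at count == 3
def buscodeAux : List Char → Int → List Char → List Char
  | [], _, new_str => new_str
  | c :: rest, count, new_str =>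
    let ns := if count = 1 ∧ c ≠ '-' then new_str ++ ['0'] else new_str
    if count = 3 then ns
    else if c = '-' then buscodeAux rest (count + 1) ns
    else if count ≠ 1 then buscodeAux rest count (ns ++ [c])
    else buscodeAux rest count ns

def buscode (string : String) : String :=
  String.ofList (buscodeAux string.toList 0 [])

-- ===== PORT B =====
def buscode_alt (string : String) : String :=
  let parts := PySem.Chars.splitOn string.toList ['-']
  let res := (PySem.List.pyGet? parts 0).getD []
  let res := if 2 ≤ parts.length then res ++ List.replicate ((PySem.List.pyGet? parts 1).getD []).length '0' else res
  let res := if 3 ≤ parts.length then res ++ (PySem.List.pyGet? parts 2).getD [] else res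
  String.ofList res

-- ===== PRECONDITION & SPEC =====
def Spec_buscode (string : String) (out : String) : Prop := out = buscode_alt string
instance (string : String) (out : String) : Decidable (Spec_buscode string out) := by unfold Spec_buscode; infer_instance

-- ===== CLAIM (what is proved, stated in full; the proofs are below) =====
def Claim_equal_buscode : Prop := ∀ (string : String), Dom_buscode string → Spec_buscode string (buscode string)

-- ===== LEMMAS AND PROOFS =====

-- Python's str.split('-') as a structural recursion
def mySplit : List Char → List (List Char)
  | [] => [[]]
  | c :: cs => if c = '-' then [] :: mySplit cs else (mySplit cs).modifyHead (c :: ·)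

theorem mySplit_ne_nil (l : List Char) : mySplit l ≠ [] := by
  induction l with
  | nil => simp [mySplit]
  | cons c cs ih =>
    simp only [mySplit]
    split
    · simp
    · cases h : mySplit cs with
      | nil => exact absurd h ih
      | cons p ps => simp [List.modifyHead]

theorem go_eq : ∀ (fuel : Nat) (l cur : List Char) (acc : List (List Char)),
    l.length ≤ fuel →
    PySem.Chars.splitOn.go ['-'] fuel l cur acc =
      acc.reverse ++ (mySplit l).modifyHead (cur.reverse ++ ·) := by
  intro fuel
  induction fuel with
  | zero =>
    intro l cur acc h
    have : l = [] := List.eq_nil_of_length_eq_zero (Nat.le_zero.mp h)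
    subst this
    simp [PySem.Chars.splitOn.go, mySplit]
  | succ n ih =>
    intro l cur acc h
    cases l with
    | nil => simp [PySem.Chars.splitOn.go, mySplit]
    | cons c rest =>
      by_cases hc : c = '-'
      · subst hc
        rw [PySem.Chars.splitOn.go]
        have hp : List.isPrefixOf ['-'] ('-' :: rest) = true := by
          simp [List.isPrefixOf]
        rw [if_pos hp]
        rw [ih _ _ _ (by simpa using Nat.le_of_succ_le_succ h)]
        simp only [mySplit]
        obtain ⟨p, ps, hps⟩ := List.exists_cons_of_ne_nil (mySplit_ne_nil rest)
        simp [List.modifyHead, hps]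
      · rw [PySem.Chars.splitOn.go]
        have hp : List.isPrefixOf ['-'] (c :: rest) = false := by
          simp [List.isPrefixOf]; exact fun hh => absurd hh.symm hc
        rw [if_neg (by simp [hp])]
        rw [ih _ _ _ (by simpa using Nat.le_of_succ_le_succ h)]
        simp only [mySplit, if_neg hc]
        obtain ⟨p, ps, hps⟩ := List.exists_cons_of_ne_nil (mySplit_ne_nil rest)
        rw [hps]
        simp

theorem splitOn_eq (l : List Char) : PySem.Chars.splitOn l ['-'] = mySplit l := by
  rw [PySem.Chars.splitOn, go_eq _ _ _ _ (by omega)]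
  obtain ⟨p, ps, hps⟩ := List.exists_cons_of_ne_nil (mySplit_ne_nil l)
  rw [hps]; simp

-- the accumulator of A's loop factors out
theorem buscodeAux_acc (cs : List Char) : ∀ (count : Int) (acc : List Char),
    buscodeAux cs count acc = acc ++ buscodeAux cs count [] := by
  induction cs with
  | nil => intro count acc; simp [buscodeAux]
  | cons c rest ih =>
    intro count acc
    simp only [buscodeAux]
    split_ifs
    all_goals (try (conv_lhs => rw [ih]))
    all_goals (try (conv_rhs => rw [ih]))
    all_goals simp [List.append_assoc]
  
theorem buscode_phase3 (cs : List Char) (acc : List Char) : buscodeAux cs 3 acc = acc := by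
  cases cs <;> simp [buscodeAux]

theorem buscode_phase2 (cs : List Char) : buscodeAux cs 2 [] = (mySplit cs).headD [] := by
  induction cs with
  | nil => simp [buscodeAux, mySplit]
  | cons c rest ih =>
    by_cases hc : c = '-'
    · subst hc
      simp [buscodeAux, mySplit, buscode_phase3]
    · simp only [buscodeAux, mySplit, if_neg hc]
      obtain ⟨p, ps, hps⟩ := List.exists_cons_of_ne_nil (mySplit_ne_nil rest)
      rw [buscodeAux_acc]
      simp [hc, hps, ih]

theorem buscode_phase1 (cs : List Char) :
    buscodeAux cs 1 [] =
      List.replicate ((mySplit cs).headD []).length '0' ++ (mySplit cs).tail.headD [] := by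
  induction cs with
  | nil => simp [buscodeAux, mySplit]
  | cons c rest ih =>
    by_cases hc : c = '-'
    · subst hc
      simp only [buscodeAux, mySplit]
      simp [buscode_phase2]
    · obtain ⟨p, ps, hps⟩ := List.exists_cons_of_ne_nil (mySplit_ne_nil rest)
      have hlhs : buscodeAux (c :: rest) 1 [] = buscodeAux rest 1 ['0'] := by
        simp [buscodeAux, hc]
      rw [hlhs, buscodeAux_acc rest 1 ['0']]
      rw [hps] at ih
      simp [mySplit, hc, hps, ih, List.replicate_succ]

theorem buscode_phase0 (cs : List Char) :
    buscodeAux cs 0 [] =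
      (mySplit cs).headD [] ++
        List.replicate ((mySplit cs).tail.headD []).length '0' ++
        (mySplit cs).tail.tail.headD [] := by
  induction cs with
  | nil => simp [buscodeAux, mySplit]
  | cons c rest ih =>
    by_cases hc : c = '-'
    · subst hc
      simp only [buscodeAux, mySplit]
      simp [buscode_phase1]
    · simp only [buscodeAux, mySplit, if_neg hc]
      obtain ⟨p, ps, hps⟩ := List.exists_cons_of_ne_nil (mySplit_ne_nil rest)
      rw [buscodeAux_acc]
      rw [hps] at ih
      simp [hc, hps, ih]

-- ===== VERDICT (by name: the statement is the Claim_ definition above) =====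
theorem buscode_spec : Claim_equal_buscode := by
  unfold Claim_equal_buscode
  intro s _
  unfold Spec_buscode buscode buscode_alt
  rw [splitOn_eq, buscode_phase0]
  obtain ⟨p0, ps, hps⟩ := List.exists_cons_of_ne_nil (mySplit_ne_nil s.toList)
  rw [hps]
  match ps with
  | [] => simp [PySem.List.pyGet?, PySem.List.pyIdx?]
  | [p1] => simp [PySem.List.pyGet?, PySem.List.pyIdx?]
  | p1 :: p2 :: ps' =>
      simp [PySem.List.pyGet?, PySem.List.pyIdx?]
      split_ifs <;> simp_all <;> omega
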